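-- pv_equiv track=rewrite | github.com/davidiach/erdos97 | src/erdos97/incidence_filters.py | chords_cross_in_order
-- ===== SOURCE A (Python) =====
-- from typing import Sequence
--
-- Chord = tuple[int, int]
--
-- def normalize_chord(a: int, b: int) -> Chord:
--     """Return a sorted unordered chord tuple. Reject loops."""
--     if a == b:
--         raise ValueError(f"loop chord is not allowed: ({a}, {b})")
--     return (a, b) if a < b else (b, a)
--
-- def _positions(order: Sequence[int]) -> dict[int, int]:
--     pos: dict[int, int] = {}
--     for idx, label in enumerate(order):
--         if label in pos:
--             raise ValueError(f"cyclic order is not a permutation: repeated label {label}")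
--         pos[label] = idx
--     return pos
--
-- def chords_cross_in_order(e: Chord, f: Chord, order: Sequence[int]) -> bool:
--     """
--     Return True iff disjoint chords e and f have alternating endpoints.
--
--     The supplied order is a cyclic order of labels. Chords sharing an endpoint
--     return False.
--     """
--     e = normalize_chord(*e)
--     f = normalize_chord(*f)
--     if set(e) & set(f):
--         return False
--
--     pos = _positions(order)
--     missing = [label for label in (*e, *f) if label not in pos]
--     if missing:
--         raise ValueError(f"chord endpoint is missing from cyclic order: {missing[0]}")
--
--     a, b = e
--     c, d = f
--     a_pos, b_pos = pos[a], pos[b]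
--     if a_pos > b_pos:
--         a_pos, b_pos = b_pos, a_pos
--     c_inside = a_pos < pos[c] < b_pos
--     d_inside = a_pos < pos[d] < b_pos
--     return c_inside != d_inside
-- ===== SOURCE B (Python) =====
-- from typing import Sequence
--
-- Chord = tuple[int, int]
--
-- def chords_cross_in_order(e: Chord, f: Chord, order: Sequence[int]) -> bool:
--     """Single scan: collect the chord id (0 for e, 1 for f) of each endpoint met
--     along the cyclic order; the chords cross iff the four ids alternate."""
--     a, b = e
--     c, d = f
--     for x, y in ((a, b), (c, d)):
--         if x == y:
--             raise ValueError(f"loop chord is not allowed: ({x}, {y})")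
--     if a in f or b in f:
--         return False
--     seen: set[int] = set()
--     seq: list[int] = []
--     for x in order:
--         if x in seen:
--             raise ValueError(f"cyclic order is not a permutation: repeated label {x}")
--         seen.add(x)
--         if x == a or x == b:
--             seq.append(0)
--         elif x == c or x == d:
--             seq.append(1)
--     if len(seq) != 4:
--         for lab in (a, b, c, d):
--             if lab not in seen:
--                 raise ValueError(f"chord endpoint is missing from cyclic order: {lab}")
--     return seq == [0, 1, 0, 1] or seq == [1, 0, 1, 0]
-- ===== Notes on version B (the rewrite author's own statement) =====
-- stated objective: alternative
-- what changed: B drops the position dictionary and the inside-interval orientation test entirely: one linear scan of the cyclic order (with an accompanying seen-set for the permutation check) collects the chord id (0 for e, 1 for f) of each endpoint it meets, and the chords cross iff those four ids alternate.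
import Mathlib
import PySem

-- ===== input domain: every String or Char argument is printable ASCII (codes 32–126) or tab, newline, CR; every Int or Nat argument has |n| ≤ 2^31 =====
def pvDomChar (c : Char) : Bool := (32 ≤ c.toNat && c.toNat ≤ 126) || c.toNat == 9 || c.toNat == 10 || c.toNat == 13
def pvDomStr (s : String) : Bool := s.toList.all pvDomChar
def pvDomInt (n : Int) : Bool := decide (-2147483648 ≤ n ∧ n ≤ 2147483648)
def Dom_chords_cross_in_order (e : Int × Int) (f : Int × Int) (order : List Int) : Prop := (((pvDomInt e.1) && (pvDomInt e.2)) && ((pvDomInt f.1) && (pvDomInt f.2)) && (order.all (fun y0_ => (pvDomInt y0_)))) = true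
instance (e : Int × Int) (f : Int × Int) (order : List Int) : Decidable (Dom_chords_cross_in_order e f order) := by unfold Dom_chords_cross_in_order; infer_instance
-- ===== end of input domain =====

-- B drops A's position dictionary and inside-interval test: one scan of the cyclic order
-- collects the chord id of each endpoint met, and the chords cross iff the ids alternate.


-- ===== PORT A =====
-- normalize_chord: the loop case (a = b) raises ValueError in Python; it is outside Pre_.
def pvNormalize (a b : Int) : Int × Int := if a < b then (a, b) else (b, a)

-- _positions: the duplicate-label check raises in Python (outside Pre_ unless the shared-endpoint
-- early return fires first, in which case pos is never used); the loop itself is this recursion.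
def pvPositions : List Int → Int → PySem.Dict Int Int → PySem.Dict Int Int
  | [], _, d => d
  | l :: t, i, d => pvPositions t (i + 1) (d.insert l i)

-- A's final lines: swap a_pos/b_pos if needed, then the two inside-interval tests
def pvTestA (aP bP cP dP : Int) : Bool :=
  let ab := if aP > bP then (bP, aP) else (aP, bP)
  let cInside := decide (ab.1 < cP) && decide (cP < ab.2)
  let dInside := decide (ab.1 < dP) && decide (dP < ab.2)
  cInside != dInside

def chords_cross_in_order (e : Int × Int) (f : Int × Int) (order : List Int) : Bool :=
  let en := pvNormalize e.1 e.2
  let fn := pvNormalize f.1 f.2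
  if PySem.Set.inter (PySem.Set.ofList [en.1, en.2]) (PySem.Set.ofList [fn.1, fn.2]) ≠ [] then
    false
  else
    let pos := pvPositions order 0 PySem.Dict.empty
    -- Python raises ValueError on a missing endpoint (outside Pre_); the port returns false there
    if pos.contains en.1 && pos.contains en.2 && pos.contains fn.1 && pos.contains fn.2 then
      pvTestA (pos.getD en.1 0) (pos.getD en.2 0) (pos.getD fn.1 0) (pos.getD fn.2 0)
    else false

-- ===== PORT B =====
-- B's scan loop: walk order once with a seen-set, collecting the chord id of every
-- endpoint met; none = the repeated-label ValueError (outside Pre_)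
def pvScanB (a b c d : Int) : List Int → PySem.Set Int → Option (List Int)
  | [], _ => some []
  | x :: t, seen =>
    if seen.contains x then none
    else
      match pvScanB a b c d t (seen.add x) with
      | none => none
      | some s =>
        if x == a || x == b then some (0 :: s)
        else if x == c || x == d then some (1 :: s)
        else some s

def chords_cross_in_order_alt (e : Int × Int) (f : Int × Int) (order : List Int) : Bool :=
  -- the loop-chord ValueError (outside Pre_): the port returns false there
  if e.1 == e.2 || f.1 == f.2 then false
  else if e.1 == f.1 || e.1 == f.2 || e.2 == f.1 || e.2 == f.2 then false
  else
    match pvScanB e.1 e.2 f.1 f.2 order PySem.Set.empty with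
    | none => false
    | some seq =>
      -- the missing-endpoint ValueError (outside Pre_): the port returns false there
      if seq.length != 4 then false
      else seq == [0, 1, 0, 1] || seq == [1, 0, 1, 0]

-- ===== PRECONDITION & SPEC =====
-- Pre_ excludes exactly the inputs on which A raises ValueError: a loop chord, and — unless the
-- shared-endpoint early return fires first — a repeated label in order or a chord endpoint missing
-- from order.
def Pre_chords_cross_in_order (e : Int × Int) (f : Int × Int) (order : List Int) : Prop :=
  e.1 ≠ e.2 ∧ f.1 ≠ f.2 ∧
    ((e.1 = f.1 ∨ e.1 = f.2 ∨ e.2 = f.1 ∨ e.2 = f.2) ∨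
     (order.Nodup ∧ e.1 ∈ order ∧ e.2 ∈ order ∧ f.1 ∈ order ∧ f.2 ∈ order))
instance (e : Int × Int) (f : Int × Int) (order : List Int) : Decidable (Pre_chords_cross_in_order e f order) := by unfold Pre_chords_cross_in_order; infer_instance

def pvWitness_chords_cross_in_order : (Int × Int) × (Int × Int) × List Int :=
  ((1, 3), (2, 4), [1, 2, 3, 4])

def Spec_chords_cross_in_order (e : Int × Int) (f : Int × Int) (order : List Int) (out : Bool) : Prop := out = chords_cross_in_order_alt e f order
instance (e : Int × Int) (f : Int × Int) (order : List Int) (out : Bool) : Decidable (Spec_chords_cross_in_order e f order out) := by unfold Spec_chords_cross_in_order; infer_instance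

-- ===== CLAIM (what is proved, stated in full; the proofs are below) =====
def Claim_equal_chords_cross_in_order : Prop := ∀ (e : Int × Int) (f : Int × Int) (order : List Int), Dom_chords_cross_in_order e f order → Pre_chords_cross_in_order e f order → Spec_chords_cross_in_order e f order (chords_cross_in_order e f order)

-- ===== LEMMAS AND PROOFS =====

theorem pvNormalize_cases (a b : Int) :
    pvNormalize a b = (a, b) ∨ pvNormalize a b = (b, a) := by
  unfold pvNormalize; split <;> simp

-- pvTestA is insensitive to the order within each chord (A only uses it after sorting/xor)
theorem pvTestA_comm_ab (pa pb pc pd : Int) : pvTestA pa pb pc pd = pvTestA pb pa pc pd := by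
  unfold pvTestA
  rcases lt_trichotomy pa pb with h | rfl | h
  · simp [h, not_lt_of_gt h]
  · rfl
  · simp [h, not_lt_of_gt h]

theorem pvTestA_comm_cd (pa pb pc pd : Int) : pvTestA pa pb pc pd = pvTestA pa pb pd pc := by
  unfold pvTestA
  simp [bne, eq_comm]

theorem pvPositions_get?_not_mem (t : List Int) (i : Int) (d : PySem.Dict Int Int) (x : Int)
    (hx : x ∉ t) :
    (pvPositions t i d).get? x = d.get? x := by
  induction t generalizing i d with
  | nil => rfl
  | cons l t ih =>
    have hxl : x ≠ l := fun h => hx (h ▸ List.mem_cons_self)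
    have hxt : x ∉ t := fun h => hx (List.mem_cons_of_mem _ h)
    rw [show pvPositions (l :: t) i d = pvPositions t (i + 1) (d.insert l i) from rfl]
    rw [ih (i + 1) _ hxt, PySem.Dict.get?_insert_of_ne _ _ hxl]

-- lookup in the positions dict of a duplicate-free order: the index of the label
theorem pvPositions_get?_mem (t : List Int) (i : Int) (d : PySem.Dict Int Int) (x : Int)
    (hnd : t.Nodup) (hx : x ∈ t) :
    (pvPositions t i d).get? x = some (i + (t.idxOf x : Int)) := by
  induction t generalizing i d with
  | nil => cases hx
  | cons l t ih =>
    by_cases hxl : x = l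
    · subst hxl
      have hxt : x ∉ t := (List.nodup_cons.mp hnd).1
      rw [show pvPositions (x :: t) i d = pvPositions t (i + 1) (d.insert x i) from rfl]
      rw [pvPositions_get?_not_mem t (i + 1) _ x hxt]
      simp [PySem.Dict.get?_insert_self]
    · have hxt : x ∈ t := by cases hx with | head => exact absurd rfl hxl | tail _ h => exact h
      rw [show pvPositions (l :: t) i d = pvPositions t (i + 1) (d.insert l i) from rfl]
      rw [ih (i + 1) _ (List.nodup_cons.mp hnd).2 hxt]
      have : (l :: t).idxOf x = t.idxOf x + 1 := by simp [Ne.symm hxl]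
      rw [this]; push_cast; ring_nf

-- a duplicate-free list is strictly increasing in its own idxOf
theorem nodup_pairwise_idxOf (l : List Int) (hnd : l.Nodup) :
    l.Pairwise (fun x y => l.idxOf x < l.idxOf y) := by
  rw [List.pairwise_iff_getElem]
  intro i j hi hj hij
  rw [hnd.idxOf_getElem i hi, hnd.idxOf_getElem j hj]
  exact hij

-- shared endpoint: the set intersection in A is nonempty
theorem pvInter_ne_nil (a b c d : Int) (h : a = c ∨ a = d ∨ b = c ∨ b = d) :
    PySem.Set.inter (PySem.Set.ofList [a, b]) (PySem.Set.ofList [c, d]) ≠ [] := by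
  intro hnil
  have hm : ∀ x, x ∈ [a, b] → x ∈ [c, d] → False := by
    intro x hx hx'
    have : x ∈ PySem.Set.inter (PySem.Set.ofList [a, b]) (PySem.Set.ofList [c, d]) :=
      (PySem.Set.mem_inter _ _ x).mpr
        ⟨(PySem.Set.mem_ofList _ _).mpr hx, (PySem.Set.mem_ofList _ _).mpr hx'⟩
    rw [hnil] at this; cases this
  rcases h with h | h | h | h
  exacts [hm a (by simp) (by simp [h]), hm a (by simp) (by simp [h]),
          hm b (by simp) (by simp [h]), hm b (by simp) (by simp [h])]

-- disjoint chords: the set intersection in A is empty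
theorem pvInter_nil (a b c d : Int) (hac : a ≠ c) (had : a ≠ d) (hbc : b ≠ c) (hbd : b ≠ d) :
    PySem.Set.inter (PySem.Set.ofList [a, b]) (PySem.Set.ofList [c, d]) = [] := by
  rw [List.eq_nil_iff_forall_not_mem]
  intro x hx
  obtain ⟨h1, h2⟩ := (PySem.Set.mem_inter _ _ x).mp hx
  rw [PySem.Set.mem_ofList] at h1 h2
  simp at h1 h2
  rcases h1 with rfl | rfl <;> rcases h2 with rfl | rfl <;> simp_all

-- the filtered scan retains exactly the four endpoints
theorem pvFilter_perm (a b c d : Int) (l : List Int) (hnd : l.Nodup)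
    (hab : a ≠ b) (hcd : c ≠ d) (hac : a ≠ c) (had : a ≠ d) (hbc : b ≠ c) (hbd : b ≠ d)
    (ha : a ∈ l) (hb : b ∈ l) (hc : c ∈ l) (hd : d ∈ l) :
    (l.filter fun x => x == a || x == b || x == c || x == d).Perm [a, b, c, d] := by
  have hmem : ∀ x, x ∈ (l.filter fun x => x == a || x == b || x == c || x == d) ↔
      x ∈ [a, b, c, d] := by
    intro x
    simp only [List.mem_filter, Bool.or_eq_true, beq_iff_eq, List.mem_cons,
      List.not_mem_nil, or_false]
    constructor
    · rintro ⟨-, h⟩; tauto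
    · intro h
      refine ⟨?_, by tauto⟩
      rcases h with rfl | rfl | rfl | rfl <;> assumption
  exact (List.perm_ext_iff_of_nodup (hnd.filter _)
    (by simp [hab, hcd, hac, had, hbc, hbd])).mpr hmem

-- B's scan loop on a duplicate-free order never hits its raise branch and
-- computes the tags of the filtered endpoints
theorem pvScanB_sound (a b c d : Int) (l : List Int) (seen : PySem.Set Int)
    (hnd : l.Nodup) (hdisj : ∀ x ∈ l, seen.contains x = false) :
    pvScanB a b c d l seen =
      some ((l.filter fun x => x == a || x == b || x == c || x == d).map
        fun x => if x == a || x == b then (0 : Int) else 1) := by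
  induction l generalizing seen with
  | nil => rfl
  | cons x t ih =>
    have hx : seen.contains x = false := hdisj x List.mem_cons_self
    have hdisj' : ∀ y ∈ t, (seen.add x).contains y = false := by
      intro y hy
      have hyx : y ≠ x := fun h => (List.nodup_cons.mp hnd).1 (h ▸ hy)
      have hns : y ∉ seen := by
        have := hdisj y (List.mem_cons_of_mem _ hy)
        simpa [PySem.Set.contains, List.contains_eq_mem] using this
      have : y ∉ seen.add x := by
        rw [PySem.Set.mem_add]
        rintro (h | h)
        · exact hns h
        · exact hyx h
      simp [PySem.Set.contains, List.contains_eq_mem, this]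
    simp only [pvScanB, hx, Bool.false_eq_true, if_false,
      ih (seen.add x) (List.nodup_cons.mp hnd).2 hdisj', List.filter_cons]
    by_cases h1 : (x == a || x == b) = true <;> by_cases h2 : (x == c || x == d) = true <;>
      simp_all

-- the heart: A's inside-interval test at the four indices equals B's alternation scan
set_option maxHeartbeats 4000000 in
theorem pvScan_eq (a b c d : Int) (l : List Int) (hnd : l.Nodup)
    (hab : a ≠ b) (hcd : c ≠ d) (hac : a ≠ c) (had : a ≠ d) (hbc : b ≠ c) (hbd : b ≠ d)
    (ha : a ∈ l) (hb : b ∈ l) (hc : c ∈ l) (hd : d ∈ l) :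
    pvTestA (l.idxOf a : Int) (l.idxOf b : Int) (l.idxOf c : Int) (l.idxOf d : Int)
      = (((l.filter fun x => x == a || x == b || x == c || x == d).map
            fun x => if x == a || x == b then (0 : Int) else 1) == [0, 1, 0, 1]
         || ((l.filter fun x => x == a || x == b || x == c || x == d).map
            fun x => if x == a || x == b then (0 : Int) else 1) == [1, 0, 1, 0]) := by
  have hpw : (l.filter fun x => x == a || x == b || x == c || x == d).Pairwise
      (fun x y => l.idxOf x < l.idxOf y) := (nodup_pairwise_idxOf l hnd).filter _
  have hperm : (l.filter fun x => x == a || x == b || x == c || x == d).Perm [a, b, c, d] :=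
    pvFilter_perm a b c d l hnd hab hcd hac had hbc hbd ha hb hc hd
  have hlen : (l.filter fun x => x == a || x == b || x == c || x == d).length = 4 :=
    hperm.length_eq
  obtain ⟨x1, x2, x3, x4, hm4⟩ :
      ∃ x1 x2 x3 x4, (l.filter fun x => x == a || x == b || x == c || x == d) = [x1, x2, x3, x4] :=
    List.length_eq_four.mp hlen
  rw [hm4] at hpw hperm ⊢
  have hx1 : x1 ∈ [a, b, c, d] := hperm.mem_iff.mp (by simp)
  have hx2 : x2 ∈ [a, b, c, d] := hperm.mem_iff.mp (by simp)
  have hx3 : x3 ∈ [a, b, c, d] := hperm.mem_iff.mp (by simp)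
  have hx4 : x4 ∈ [a, b, c, d] := hperm.mem_iff.mp (by simp)
  have hndm : ([x1, x2, x3, x4] : List Int).Nodup := hperm.nodup_iff.mpr (by simp [hab, hcd, hac, had, hbc, hbd])
  simp only [List.pairwise_cons, List.mem_cons, List.not_mem_nil] at hpw
  simp only [List.mem_cons, List.not_mem_nil, or_false] at hx1 hx2 hx3 hx4
  simp only [List.nodup_cons, List.mem_cons, List.not_mem_nil] at hndm
  rcases hx1 with rfl | rfl | rfl | rfl <;> rcases hx2 with rfl | rfl | rfl | rfl <;>
    rcases hx3 with rfl | rfl | rfl | rfl <;> rcases hx4 with rfl | rfl | rfl | rfl <;>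
    simp_all [pvTestA] <;> (try split_ifs) <;> (try simp_all) <;> omega

-- ===== VERDICT (by name: the statement is the Claim_ definition above) =====
theorem chords_cross_in_order_spec : Claim_equal_chords_cross_in_order := by
  intro e f order _ hpre
  obtain ⟨he, hf, hrest⟩ := hpre
  unfold Spec_chords_cross_in_order chords_cross_in_order chords_cross_in_order_alt
  by_cases hsh : e.1 = f.1 ∨ e.1 = f.2 ∨ e.2 = f.1 ∨ e.2 = f.2
  · have hcond : (e.1 == f.1 || e.1 == f.2 || e.2 == f.1 || e.2 == f.2) = true := by
      simp only [Bool.or_eq_true, beq_iff_eq]; tauto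
    have hloop : (e.1 == e.2 || f.1 == f.2) = false := by simp [he, hf]
    rcases pvNormalize_cases e.1 e.2 with hE | hE <;> rcases pvNormalize_cases f.1 f.2 with hF | hF <;>
      simp only [hE, hF, hcond, hloop, Bool.false_eq_true, if_false, if_true] <;>
      · rw [if_pos (by first
          | exact pvInter_ne_nil _ _ _ _ hsh
          | exact pvInter_ne_nil _ _ _ _ (by tauto))]
  · push Not at hsh
    obtain ⟨hac, had, hbc, hbd⟩ := hsh
    have hrest' : order.Nodup ∧ e.1 ∈ order ∧ e.2 ∈ order ∧ f.1 ∈ order ∧ f.2 ∈ order := by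
      rcases hrest with h | h
      · tauto
      · exact h
    obtain ⟨hnd, hma, hmb, hmc, hmd⟩ := hrest'
    have hcond : (e.1 == f.1 || e.1 == f.2 || e.2 == f.1 || e.2 == f.2) = false := by
      simp [hac, had, hbc, hbd]
    have hget : ∀ x ∈ order, (pvPositions order 0 PySem.Dict.empty).get? x =
        some ((order.idxOf x : Int)) := by
      intro x hx
      rw [pvPositions_get?_mem order 0 PySem.Dict.empty x hnd hx]; ring_nf
    have hcont : ∀ x ∈ order, (pvPositions order 0 PySem.Dict.empty).contains x = true := by
      intro x hx
      rw [PySem.Dict.contains_eq_isSome_get?, hget x hx]; rfl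
    have hgetD : ∀ x ∈ order, (pvPositions order 0 PySem.Dict.empty).getD x 0 =
        (order.idxOf x : Int) := by
      intro x hx
      rw [PySem.Dict.getD_eq_get?_getD, hget x hx, Option.getD_some]
    have hmain := pvScan_eq e.1 e.2 f.1 f.2 order hnd he hf hac had hbc hbd hma hmb hmc hmd
    have hloop : (e.1 == e.2 || f.1 == f.2) = false := by simp [he, hf]
    have hdisj0 : ∀ x ∈ order, (PySem.Set.empty : PySem.Set Int).contains x = false := by
      intro x _; rfl
    have hscan := pvScanB_sound e.1 e.2 f.1 f.2 order PySem.Set.empty hnd hdisj0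
    have hne : (((order.filter fun x => x == e.1 || x == e.2 || x == f.1 || x == f.2).map
        fun x => if x == e.1 || x == e.2 then (0 : Int) else 1).length != 4) = false := by
      rw [List.length_map,
        (pvFilter_perm e.1 e.2 f.1 f.2 order hnd he hf hac had hbc hbd hma hmb hmc hmd).length_eq]
      rfl
    rcases pvNormalize_cases e.1 e.2 with hE | hE <;> rcases pvNormalize_cases f.1 f.2 with hF | hF <;>
      simp only [hE, hF, hcond, hloop, hscan, hne, Bool.false_eq_true, if_false] <;>
      rw [if_neg (by
        first
          | exact fun h => h (pvInter_nil _ _ _ _ hac had hbc hbd)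
          | exact fun h => h (pvInter_nil _ _ _ _ hbc hbd hac had)
          | exact fun h => h (pvInter_nil _ _ _ _ had hac hbd hbc)
          | exact fun h => h (pvInter_nil _ _ _ _ hbd hbc had hac))] <;>
      rw [if_pos (by simp [hcont _ hma, hcont _ hmb, hcont _ hmc, hcont _ hmd])] <;>
      rw [hgetD _ hma, hgetD _ hmb, hgetD _ hmc, hgetD _ hmd] <;>
      first
        | exact hmain
        | rw [pvTestA_comm_ab]; exact hmain
        | rw [pvTestA_comm_cd]; exact hmain
        | rw [pvTestA_comm_ab, pvTestA_comm_cd]; exact hmain
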